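-- pv_equiv track=rewrite | github.com/ckoons/BubbleSpacetimeTheory | play/compute_seeley_dewitt.py | N_full
-- ===== SOURCE A (Python) =====
-- def dim_so7(p, q):
--     """Dimension of the (p, q, 0) irreducible representation of SO(7).
--
--     From the Weyl dimension formula for B₃ with highest weight (p, q, 0)
--     and half-sum ρ = (5/2, 3/2, 1/2).
--
--     Positive roots of B₃: e_i ± e_j (i<j), e_i  [9 total]
--     """
--     num = ((p + q + 4) * (p - q + 1) * (p + 3) * (p + 2) *
--            (q + 2) * (q + 1) * (2 * p + 5) * (2 * q + 3))
--     assert num % 720 == 0, f"Non-integer dimension for ({p},{q}): {num}/720"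
--     return num // 720
--
-- def eigenvalue(p, q):
--     """Casimir eigenvalue of the (p, q, 0) representation.
--
--     λ = ⟨μ, μ + 2ρ⟩ where μ = (p, q, 0), ρ = (5/2, 3/2, 1/2).
--     = p(p+5) + q(q+3)
--     """
--     return p * (p + 5) + q * (q + 3)
--
-- def N_full(lam_max):
--     """Count eigenvalues (with multiplicity) up to lam_max, full spectrum."""
--     total = 0
--     for p in range(10000):
--         if eigenvalue(p, 0) > lam_max:
--             break
--         for q in range(p + 1):
--             if eigenvalue(p, q) > lam_max:
--                 break
--             total += dim_so7(p, q)
--     return total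
-- ===== SOURCE B (Python) =====
-- def _qsum(p, m):
--     """6*720 * sum_{q=0}^{m} dim_so7(p, q), as an explicit polynomial in p and m
--     (Faulhaber closed form of the Weyl-dimension sum over q)."""
--     return (4320 + 7200*m + 840*m**2 - 4320*m**3 - 2940*m**4 - 720*m**5 - 60*m**6
--             + p*(10728 + 21480*m + 11386*m**2 - 1728*m**3 - 3176*m**4 - 888*m**5 - 74*m**6)
--             + p**2*(9900 + 21660*m + 15255*m**2 + 3000*m**3 - 825*m**4 - 360*m**5 - 30*m**6)
--             + p**3*(4320 + 9888*m + 7784*m**2 + 2400*m**3 + 140*m**4 - 48*m**5 - 4*m**6)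
--             + p**4*(900 + 2100*m + 1725*m**2 + 600*m**3 + 75*m**4)
--             + p**5*(72 + 168*m + 138*m**2 + 48*m**3 + 6*m**4))
--
-- def N_full(lam_max):
--     """Count eigenvalues (with multiplicity) up to lam_max, full spectrum."""
--     # largest q with q*(q+3) <= lam_max (or -1 if none)
--     q = -1
--     while (q + 1) * (q + 4) <= lam_max:
--         q += 1
--     total = 0
--     p = 0
--     while p < 10000 and p * (p + 5) <= lam_max:
--         r = lam_max - p * (p + 5)
--         while q * (q + 3) > r:          # q only ever decreases as p grows
--             q -= 1
--         m = q if q < p else p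
--         total += _qsum(p, m) // 4320    # exact division
--         p += 1
--     return total
-- ===== Notes on version B (the rewrite author's own statement) =====
-- stated objective: faster
-- what changed: The inner q-loop (one dim_so7 evaluation per q) is replaced by a closed-form Faulhaber polynomial for the whole q-sum, and the per-p break bound on q is maintained by a monotone two-pointer instead of being re-scanned, making the work O(min(sqrt(lam_max),10000)) instead of O(lam_max).
import Mathlib
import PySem

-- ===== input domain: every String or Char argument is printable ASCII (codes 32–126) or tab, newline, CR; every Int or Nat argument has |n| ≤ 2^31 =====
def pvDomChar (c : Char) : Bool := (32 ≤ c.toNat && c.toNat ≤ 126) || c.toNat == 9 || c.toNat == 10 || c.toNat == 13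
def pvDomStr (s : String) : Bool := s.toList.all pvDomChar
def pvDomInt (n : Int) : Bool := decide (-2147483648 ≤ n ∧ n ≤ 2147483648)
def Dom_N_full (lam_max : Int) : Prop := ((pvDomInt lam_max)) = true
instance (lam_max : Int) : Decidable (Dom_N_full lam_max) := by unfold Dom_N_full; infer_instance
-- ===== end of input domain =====

-- B replaces the inner q-loop by a closed-form (Faulhaber) polynomial and tracks the q cut-off
-- with a monotone two-pointer; objective: faster.

-- ===== PORT A =====
def numA (p q : Int) : Int :=
  (p + q + 4) * (p - q + 1) * (p + 3) * (p + 2) * (q + 2) * (q + 1) * (2 * p + 5) * (2 * q + 3)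

def dim_so7 (p q : Int) : Int := PySem.Int.floordiv (numA p q) 720
  -- Python's assert num % 720 == 0 never fires (720 ∣ numA, proved below), so it is not ported

def eigenvalue (p q : Int) : Int := p * (p + 5) + q * (q + 3)

def qloopA (lam p : Int) : List Int → Int → Int
  | [], total => total
  | q :: qs, total =>
    if eigenvalue p q > lam then total
    else qloopA lam p qs (total + dim_so7 p q)

def ploopA (lam : Int) : List Int → Int → Int
  | [], total => total
  | p :: ps, total =>
    if eigenvalue p 0 > lam then total
    else ploopA lam ps (qloopA lam p (PySem.List.pyRange 0 (p + 1) 1) total)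

def N_full (lam_max : Int) : Int := ploopA lam_max (PySem.List.pyRange 0 10000 1) 0

-- ===== PORT B =====
def qsum (p m : Int) : Int :=
  4320 + 7200*m + 840*m^2 - 4320*m^3 - 2940*m^4 - 720*m^5 - 60*m^6
  + p*(10728 + 21480*m + 11386*m^2 - 1728*m^3 - 3176*m^4 - 888*m^5 - 74*m^6)
  + p^2*(9900 + 21660*m + 15255*m^2 + 3000*m^3 - 825*m^4 - 360*m^5 - 30*m^6)
  + p^3*(4320 + 9888*m + 7784*m^2 + 2400*m^3 + 140*m^4 - 48*m^5 - 4*m^6)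
  + p^4*(900 + 2100*m + 1725*m^2 + 600*m^3 + 75*m^4)
  + p^5*(72 + 168*m + 138*m^2 + 48*m^3 + 6*m^4)

-- Source B: `while (q+1)*(q+4) <= lam_max: q += 1`
def qinit (lam q : Int) : Int :=
  if (q + 1) * (q + 4) ≤ lam then qinit lam (q + 1) else q
termination_by (lam + 5 - q).toNat
decreasing_by
  rename_i h
  have h2 : q * q + 4 * q + 8 > 0 := by nlinarith [sq_nonneg (q + 2)]
  have h3 : q - 4 ≤ (q + 1) * (q + 4) := by nlinarith
  omega

-- Source B: `while q*(q+3) > r: q -= 1`; the extra `0 < q` is a pure totality guard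
-- (in every run of B, r ≥ 0 so the Python loop never tests a q below 0)
def qdec (r q : Int) : Int :=
  if q * (q + 3) > r ∧ 0 < q then qdec r (q - 1) else q
termination_by q.toNat
decreasing_by omega

def ploopB (lam p q total : Int) : Int :=
  if p < 10000 ∧ p * (p + 5) ≤ lam then
    let r := lam - p * (p + 5)
    let q' := qdec r q
    let m := if q' < p then q' else p
    ploopB lam (p + 1) q' (total + PySem.Int.floordiv (qsum p m) 4320)
  else total
termination_by (10000 - p).toNat
decreasing_by omega

def N_full_alt (lam_max : Int) : Int := ploopB lam_max 0 (qinit lam_max (-1)) 0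

-- ===== PRECONDITION & SPEC =====
def Spec_N_full (lam_max : Int) (out : Int) : Prop := out = N_full_alt lam_max
instance (lam_max : Int) (out : Int) : Decidable (Spec_N_full lam_max out) := by unfold Spec_N_full; infer_instance

-- ===== CLAIM (what is proved, stated in full; the proofs are below) =====
def Claim_equal_N_full : Prop := ∀ (lam_max : Int), Dom_N_full lam_max → Spec_N_full lam_max (N_full lam_max)

-- ===== LEMMAS AND PROOFS =====

-- Σ_{k<n} numA p k and Σ_{k<n} dim_so7 p k
def sumNum (p : Int) : Nat → Int
  | 0 => 0
  | n + 1 => sumNum p n + numA p n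
def sumDim (p : Int) : Nat → Int
  | 0 => 0
  | n + 1 => sumDim p n + dim_so7 p n

lemma zmodFact (n : ℕ) [NeZero n] (h : ∀ a b : ZMod n,
      (a + b + 4) * (a - b + 1) * (a + 3) * (a + 2) * (b + 2) * (b + 1) * (2*a + 5) * (2*b + 3) = 0)
    (p q : Int) : ((n : ℕ) : Int) ∣ numA p q := by
  rw [← ZMod.intCast_zmod_eq_zero_iff_dvd]
  unfold numA
  push_cast
  exact h (p : ZMod n) (q : ZMod n)

lemma dvd720_numA (p q : Int) : (720 : Int) ∣ numA p q := by
  have h16 := zmodFact 16 (by decide) p q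
  have h9 := zmodFact 9 (by decide) p q
  have h5 := zmodFact 5 (by decide) p q
  norm_num at h16 h9 h5
  omega

lemma dim_eq (p q : Int) : 720 * dim_so7 p q = numA p q := by
  have h := dvd720_numA p q
  unfold dim_so7
  rw [PySem.Int.floordiv_eq_ediv_of_pos (by norm_num)]
  omega

lemma sumNum_eq (p : Int) (n : Nat) : sumNum p n = 720 * sumDim p n := by
  induction n with
  | zero => simp [sumNum, sumDim]
  | succ k ih => simp [sumNum, sumDim, ih, Int.mul_add, dim_eq]

lemma qsum_closed (p : Int) (n : Nat) : qsum p ((n : Int) - 1) = 6 * sumNum p n := by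
  induction n with
  | zero => simp [sumNum]; unfold qsum; ring_nf
  | succ k ih =>
    unfold qsum sumNum numA
    unfold qsum at ih
    push_cast
    linear_combination ih

lemma qsum_div (p : Int) (m : Int) (hm : -1 ≤ m) :
    PySem.Int.floordiv (qsum p m) 4320 = sumDim p ((m + 1).toNat) := by
  have h1 : qsum p m = 4320 * sumDim p ((m + 1).toNat) := by
    have := qsum_closed p ((m + 1).toNat)
    rw [sumNum_eq] at this
    have hcast : (((m + 1).toNat : Int)) - 1 = m := by omega
    rw [hcast] at this
    linarith
  rw [h1, PySem.Int.floordiv_eq_ediv_of_pos (by norm_num)]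
  omega

-- the break point of the q-loop: characterisation from the two-sided bracket
lemma char_of_good (r m : Int) (h0 : 0 ≤ m) (h1 : m * (m + 3) ≤ r) (h2 : (m + 1) * (m + 4) > r) :
    ∀ v : Int, 0 ≤ v → (v * (v + 3) ≤ r ↔ v ≤ m) := by
  intro v hv
  constructor
  · intro h
    by_contra hc
    push_neg at hc
    have : (m + 1) * (m + 4) ≤ v * (v + 3) := by nlinarith
    linarith
  · intro h
    have : v * (v + 3) ≤ m * (m + 3) := by nlinarith
    linarith

lemma qdec_good_aux (r : Int) (hr : 0 ≤ r) :
    ∀ (n : Nat) (q : Int), q.toNat ≤ n → 0 ≤ q → (q + 1) * (q + 4) > r →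
      0 ≤ qdec r q ∧ (qdec r q) * (qdec r q + 3) ≤ r ∧ (qdec r q + 1) * (qdec r q + 4) > r := by
  intro n
  induction n with
  | zero =>
    intro q hn h0 hub
    have hq0 : q = 0 := by omega
    subst hq0
    rw [qdec, if_neg (by omega)]
    refine ⟨le_rfl, by omega, hub⟩
  | succ k ih =>
    intro q hn h0 hub
    rw [qdec]
    split_ifs with hc
    · refine ih (q - 1) (by omega) (by omega) ?_
      have h1 := hc.1
      nlinarith
    · rcases not_and_or.mp hc with h | h
      · exact ⟨h0, by omega, hub⟩
      · have hq0 : q = 0 := by omega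
        subst hq0
        exact ⟨le_rfl, by omega, hub⟩

lemma qdec_good (r : Int) (hr : 0 ≤ r) (q : Int) (h0 : 0 ≤ q) (hub : (q + 1) * (q + 4) > r) :
    0 ≤ qdec r q ∧ (qdec r q) * (qdec r q + 3) ≤ r ∧ (qdec r q + 1) * (qdec r q + 4) > r :=
  qdec_good_aux r hr q.toNat q le_rfl h0 hub

lemma qinit_good_aux (lam : Int) (hl : 0 ≤ lam) :
    ∀ (n : Nat) (q : Int), (lam + 5 - q).toNat ≤ n → -1 ≤ q → q * (q + 3) ≤ lam →
      0 ≤ qinit lam q ∧ (qinit lam q) * (qinit lam q + 3) ≤ lam ∧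
        (qinit lam q + 1) * (qinit lam q + 4) > lam := by
  intro n
  induction n with
  | zero =>
    intro q hn h1 h2
    have hq : lam + 5 ≤ q := by omega
    rw [qinit, if_neg (by nlinarith)]
    refine ⟨by omega, h2, by nlinarith⟩
  | succ k ih =>
    intro q hn h1 h2
    rw [qinit]
    split_ifs with hc
    · refine ih (q + 1) ?_ (by omega) (by nlinarith)
      have hfact : q - 4 ≤ (q + 1) * (q + 4) := by nlinarith [sq_nonneg (q + 2)]
      omega
    · push_neg at hc
      have hq0 : 0 ≤ q := by
        by_contra hneg
        have hq1 : q = -1 := by omega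
        subst hq1
        norm_num at hc
        omega
      exact ⟨hq0, h2, hc⟩

lemma qinit_good (lam : Int) (hl : 0 ≤ lam) (q : Int) (h1 : -1 ≤ q) (h2 : q * (q + 3) ≤ lam) :
    0 ≤ qinit lam q ∧ (qinit lam q) * (qinit lam q + 3) ≤ lam ∧
      (qinit lam q + 1) * (qinit lam q + 4) > lam :=
  qinit_good_aux lam hl (lam + 5 - q).toNat q le_rfl h1 h2

-- inner loop of A = a segment of sumDim
lemma qloopA_eq (lam p m : Int) (hm : 0 ≤ m)
    (hchar : ∀ v : Int, 0 ≤ v → (v * (v + 3) ≤ lam - p * (p + 5) ↔ v ≤ m)) :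
    ∀ (n : Nat) (a total : Int), 0 ≤ a →
      qloopA lam p (PySem.List.pyRange a (a + (n : Int)) 1) total
        = total + sumDim p (min (a + n) (m + 1)).toNat - sumDim p (min a (m + 1)).toNat := by
  intro n
  induction n with
  | zero =>
    intro a total ha
    rw [Nat.cast_zero, add_zero, PySem.List.pyRange_one_eq_nil le_rfl]
    simp [qloopA]
  | succ k ih =>
    intro a total ha
    push_cast
    rw [show a + ((k : Int) + 1) = (a + 1) + (k : Int) by ring]
    rw [PySem.List.pyRange_one_cons (by omega)]
    simp only [qloopA]
    have heig : eigenvalue p a = p * (p + 5) + a * (a + 3) := by unfold eigenvalue; ring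
    by_cases hbr : a * (a + 3) ≤ lam - p * (p + 5)
    · rw [if_neg (by rw [heig]; omega)]
      rw [ih (a + 1) (total + dim_so7 p a) (by omega)]
      have hale : a ≤ m := (hchar a ha).mp hbr
      have h1 : (min (a + 1) (m + 1)).toNat = (min a (m + 1)).toNat + 1 := by omega
      have h2 : ((min a (m + 1)).toNat : Int) = a := by omega
      rw [h1]
      simp only [sumDim, h2]
      ring
    · have hma : m < a := by
        by_contra hcon
        exact hbr ((hchar a ha).mpr (by omega))
      rw [if_pos (by rw [heig]; omega)]
      have heq : (min (a + 1 + (k : Int)) (m + 1)).toNat = (min a (m + 1)).toNat := by omega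
      rw [heq]
      ring

lemma ploop_eq (lam : Int) :
    ∀ (n : Nat) (a q total : Int), 0 ≤ a → a + (n : Int) = 10000 →
      0 ≤ q → (q + 1) * (q + 4) > lam - a * (a + 5) →
      ploopA lam (PySem.List.pyRange a (a + (n : Int)) 1) total = ploopB lam a q total := by
  intro n
  induction n with
  | zero =>
    intro a q total ha hend hq hub
    rw [Nat.cast_zero, add_zero, PySem.List.pyRange_one_eq_nil le_rfl]
    rw [ploopB, if_neg (by omega)]
    rfl
  | succ k ih =>
    intro a q total ha hend hq hub
    push_cast
    push_cast at hend
    rw [show a + ((k : Int) + 1) = (a + 1) + (k : Int) by ring]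
    rw [PySem.List.pyRange_one_cons (by omega)]
    simp only [ploopA]
    have heig0 : eigenvalue a 0 = a * (a + 5) := by unfold eigenvalue; ring
    by_cases hle : a * (a + 5) ≤ lam
    · rw [if_neg (by rw [heig0]; omega)]
      have hr : 0 ≤ lam - a * (a + 5) := by omega
      obtain ⟨hg0, hg1, hg2⟩ := qdec_good (lam - a * (a + 5)) hr q hq hub
      set q' := qdec (lam - a * (a + 5)) q with hq'
      have hstep : ploopB lam a q total
          = ploopB lam (a + 1) q'
              (total + PySem.Int.floordiv (qsum a (if q' < a then q' else a)) 4320) := by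
        rw [ploopB, if_pos ⟨by omega, hle⟩]
      rw [hstep]
      have hchar := char_of_good (lam - a * (a + 5)) q' hg0 hg1 hg2
      have hinner := qloopA_eq lam a q' hg0 hchar (a + 1).toNat 0 total le_rfl
      rw [show ((0 : Int) + (((a + 1).toNat : Nat) : Int)) = a + 1 by omega] at hinner
      have hz : (min (0 : Int) (q' + 1)).toNat = 0 := by omega
      rw [hz] at hinner
      rw [hinner]
      rw [ih (a + 1) q' (total + sumDim a (min (a + 1) (q' + 1)).toNat - sumDim a 0)
        (by omega) (by omega) hg0
        (by have he : (a + 1) * ((a + 1) + 5) = a * (a + 5) + 2 * a + 6 := by ring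
            linarith)]
      congr 1
      have hm : (if q' < a then q' else a) = min q' a := by split_ifs with h <;> omega
      rw [hm, qsum_div a (min q' a) (by omega)]
      have hcnt : ((min q' a) + 1).toNat = (min (a + 1) (q' + 1)).toNat := by omega
      rw [hcnt]
      simp [sumDim]
    · rw [if_pos (by rw [heig0]; omega), ploopB, if_neg (fun h => hle h.2)]

-- ===== VERDICT (by name: the statement is the Claim_ definition above) =====
theorem N_full_spec : Claim_equal_N_full := by
  unfold Claim_equal_N_full
  intro lam _
  unfold Spec_N_full N_full N_full_alt
  by_cases hl : 0 ≤ lam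
  · have hq := qinit_good lam hl (-1) (by norm_num) (by omega)
    have := ploop_eq lam 10000 0 (qinit lam (-1)) 0 (by norm_num) (by norm_num)
      hq.1 (by have := hq.2.2; simpa using this)
    simpa using this
  · push_neg at hl
    rw [PySem.List.pyRange_one_cons (by norm_num)]
    unfold ploopA
    rw [if_pos (by unfold eigenvalue; omega)]
    rw [ploopB]
    rw [if_neg (by omega)]
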